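-- pv_equiv track=rewrite | github.com/DanielOhn/CrackingCode | OneAway.py | checkStrings
-- ===== SOURCE A (Python) =====
-- def checkStrings(a, b):
--     if (a == b): return True
--
--     short = ""
--     long = ""
--
--     if (len(a) > len(b)):
--         short = b
--         long = a
--     else:
--         short = a
--         long = b
--
--     c = 0
--
--     for i in range(len(long)):
--         for j in range(len(short)):
--             if long[i] == short[j]:
--                 c += 1
--
--     if (c >= len(long) - 1) and (len(long) - len(short) <= 1):
--         return True
--     else:
--         return False
-- ===== SOURCE B (Python) =====
-- def checkStrings(a, b):
--     if a == b:
--         return True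
--     if len(a) > len(b):
--         long, short = a, b
--     else:
--         long, short = b, a
--     xs = sorted(long)
--     ys = sorted(short)
--     # two-pointer merge over the two sorted lists: for each common character,
--     # multiply the lengths of its runs; the sum equals the number of matching pairs
--     c = 0
--     i = j = 0
--     n, m = len(xs), len(ys)
--     while i < n and j < m:
--         if xs[i] < ys[j]:
--             i += 1
--         elif ys[j] < xs[i]:
--             j += 1
--         else:
--             ch = xs[i]
--             i2 = i
--             while i2 < n and xs[i2] == ch:
--                 i2 += 1
--             j2 = j
--             while j2 < m and ys[j2] == ch:
--                 j2 += 1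
--             c += (i2 - i) * (j2 - j)
--             i, j = i2, j2
--     return c >= len(long) - 1 and len(long) - len(short) <= 1
-- ===== Notes on version B (the rewrite author's own statement) =====
-- stated objective: faster
-- what changed: Sorts both strings and computes the matching-pair count by a two-pointer merge over the sorted lists, adding the product of the run lengths of each common character, instead of A's nested scan of every index pair.
import Mathlib
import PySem

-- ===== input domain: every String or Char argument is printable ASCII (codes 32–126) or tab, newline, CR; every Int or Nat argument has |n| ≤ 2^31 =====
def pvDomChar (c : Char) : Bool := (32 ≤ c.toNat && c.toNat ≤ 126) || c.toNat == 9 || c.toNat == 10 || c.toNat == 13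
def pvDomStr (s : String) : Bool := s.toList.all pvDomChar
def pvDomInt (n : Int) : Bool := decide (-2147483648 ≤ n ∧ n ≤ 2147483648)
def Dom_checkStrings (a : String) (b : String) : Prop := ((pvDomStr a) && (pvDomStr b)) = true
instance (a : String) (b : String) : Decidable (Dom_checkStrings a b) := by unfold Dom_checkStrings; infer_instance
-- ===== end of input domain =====

-- B sorts both strings and computes the matching-pair count by a two-pointer merge
-- over character runs (product of run lengths per common character), replacing A's
-- nested O(n*m) scan; objective: faster (O((n+m) log(n+m))).

-- ===== PORT A =====
def checkStrings (a : String) (b : String) : Bool :=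
  if a == b then true
  else
    let short := if a.toList.length > b.toList.length then b else a
    let long  := if a.toList.length > b.toList.length then a else b
    let ls := long.toList
    let ss := short.toList
    let c : Int :=
      (PySem.List.pyRange 0 ls.length 1).foldl (fun c i =>
        (PySem.List.pyRange 0 ss.length 1).foldl (fun c j =>
          if PySem.List.pyGetD ls i ' ' == PySem.List.pyGetD ss j ' ' then c + 1 else c) c) 0
    if c ≥ (ls.length : Int) - 1 ∧ (ls.length : Int) - (ss.length : Int) ≤ 1 then true else false

-- ===== PORT B =====
-- the two-pointer merge of Source B: recursion on the two sorted lists; on a common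
-- character it adds the product of the two run lengths and drops both runs
def pvRunProd : List Char → List Char → Int
  | [], _ => 0
  | _ :: _, [] => 0
  | x :: xs, y :: ys =>
    if x < y then pvRunProd xs (y :: ys)
    else if y < x then pvRunProd (x :: xs) ys
    else
      (((x :: xs).takeWhile (· == x)).length : Int) * (((y :: ys).takeWhile (· == y)).length : Int)
        + pvRunProd ((x :: xs).dropWhile (· == x)) ((y :: ys).dropWhile (· == y))
termination_by xs ys => xs.length + ys.length
decreasing_by
  · simp only [List.length_cons]; omega
  · simp only [List.length_cons]; omega
  · have h1 : (List.dropWhile (· == x) (x :: xs)).length ≤ xs.length := by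
      simpa [List.dropWhile_cons] using List.length_dropWhile_le (· == x) xs
    have h2 : (List.dropWhile (· == y) (y :: ys)).length ≤ ys.length := by
      simpa [List.dropWhile_cons] using List.length_dropWhile_le (· == y) ys
    simp only [List.length_cons]; omega

def checkStrings_alt (a : String) (b : String) : Bool :=
  if a == b then true
  else
    let long  := if a.toList.length > b.toList.length then a else b
    let short := if a.toList.length > b.toList.length then b else a
    let xs := PySem.List.sorted long.toList (fun c => c) false
    let ys := PySem.List.sorted short.toList (fun c => c) false
    let c : Int := pvRunProd xs ys
    decide (c ≥ (long.toList.length : Int) - 1 ∧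
            (long.toList.length : Int) - (short.toList.length : Int) ≤ 1)

-- ===== PRECONDITION & SPEC =====
def Spec_checkStrings (a : String) (b : String) (out : Bool) : Prop := out = checkStrings_alt a b
instance (a : String) (b : String) (out : Bool) : Decidable (Spec_checkStrings a b out) := by unfold Spec_checkStrings; infer_instance

-- ===== CLAIM (what is proved, stated in full; the proofs are below) =====
def Claim_equal_checkStrings : Prop := ∀ (a : String) (b : String), Dom_checkStrings a b → Spec_checkStrings a b (checkStrings a b)

-- ===== LEMMAS AND PROOFS =====

theorem pv_ite_decide (p : Prop) [Decidable p] : (if p then true else false) = decide p := by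
  split <;> simp_all

-- A's nested index loops compute, for each character of `ls`, the number of its
-- occurrences in `ss`, summed up.
theorem pvA_count (ls ss : List Char) :
    (PySem.List.pyRange 0 ls.length 1).foldl (fun c i =>
        (PySem.List.pyRange 0 ss.length 1).foldl (fun c j =>
          if PySem.List.pyGetD ls i ' ' == PySem.List.pyGetD ss j ' ' then c + 1 else c) c) (0 : Int)
    = ls.foldl (fun c ch => c + (ss.count ch : Int)) 0 := by
  have hcnt : ∀ (ch : Char) (l : List Char) (c : Int),
      l.foldl (fun c x => if ch == x then c + 1 else c) c = c + (l.count ch : Int) := by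
    intro ch l
    induction l with
    | nil => simp [List.count]
    | cons x xs ih =>
      intro c
      simp only [List.foldl_cons, ih, List.count_cons]
      by_cases h : ch = x
      · simp [h]; ring
      · have hb : (ch == x) = false := by simp [h]
        have hb' : (x == ch) = false := by simp [Ne.symm h]
        simp [hb, hb']
  have hin : ∀ (ch : Char) (c : Int),
      (PySem.List.pyRange 0 (ss.length : Int) 1).foldl (fun c j =>
        if ch == PySem.List.pyGetD ss j ' ' then c + 1 else c) c
      = c + (ss.count ch : Int) := by
    intro ch c
    rw [PySem.List.foldl_pyRange_zero_pyGetD' ss ' '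
      (fun (c : Int) (x : Char) => if ch == x then c + 1 else c) c]
    exact hcnt ch ss c
  rw [PySem.List.foldl_pyRange_zero_pyGetD' ls ' '
    (fun (c : Int) (ch : Char) =>
      (PySem.List.pyRange 0 (ss.length : Int) 1).foldl (fun c j =>
        if ch == PySem.List.pyGetD ss j ' ' then c + 1 else c) c) (0 : Int)]
  exact List.foldl_ext _ _ 0 (fun c ch _ => hin ch c)

-- the sum Σ_{a ∈ xs} count a ys, as a map-sum
def pvS (xs ys : List Char) : Int := (xs.map (fun a => (ys.count a : Int))).sum

theorem pv_foldl_eq_S (xs ys : List Char) :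
    xs.foldl (fun c ch => c + (ys.count ch : Int)) 0 = pvS xs ys := by
  have h : ∀ (l : List Char) (c : Int),
      l.foldl (fun c ch => c + (ys.count ch : Int)) c = c + pvS l ys := by
    intro l
    induction l with
    | nil => simp [pvS]
    | cons x t ih =>
      intro c
      simp only [List.foldl_cons, ih, pvS, List.map_cons, List.sum_cons]
      ring
  simpa using h xs 0

theorem pv_dropWhile_head_false (p : Char → Bool) (l : List Char) (b : Char) (t : List Char)
    (h : l.dropWhile p = b :: t) : p b = false := by
  induction l with
  | nil => simp at h
  | cons c cs ih =>
    by_cases hc : p c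
    · exact ih (by simpa [List.dropWhile_cons, hc] using h)
    · have : c = b := by simp [hc] at h; exact h.1
      simpa [this] using hc

theorem pv_sum_map_const (l : List Char) (c : Int) :
    (l.map (fun _ => c)).sum = (l.length : Int) * c := by
  induction l with
  | nil => simp
  | cons x t ih => simp; ring

-- on sorted inputs, the run-merge computes exactly Σ_{a ∈ xs} count a ys
theorem pvRunProd_eq_S_aux : ∀ (n : Nat) (xs ys : List Char), xs.length + ys.length ≤ n →
    xs.Pairwise (· ≤ ·) → ys.Pairwise (· ≤ ·) → pvRunProd xs ys = pvS xs ys := by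
  intro n
  induction n with
  | zero =>
    intro xs ys hlen _ _
    have hx0 : xs = [] := by cases xs <;> simp_all
    subst hx0; simp [pvRunProd, pvS]
  | succ n ih =>
    intro xs ys hlen hx hy
    match xs, ys with
    | [], ys => simp [pvRunProd, pvS]
    | x :: xs, [] => simp [pvRunProd, pvS, List.count_nil]
    | x :: xs, y :: ys =>
      rw [pvRunProd]
      have hx' := List.pairwise_cons.mp hx
      have hy' := List.pairwise_cons.mp hy
      by_cases h1 : x < y
      · simp only [if_pos h1]
        have hnot : x ∉ y :: ys := by
          intro hmem
          rcases List.mem_cons.mp hmem with h | h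
          · exact absurd h1 (by simp [h])
          · exact absurd h1 (not_lt.mpr (hy'.1 x h))
        have hc0 : (y :: ys).count x = 0 := List.count_eq_zero.mpr hnot
        have := ih xs (y :: ys) (by simp at hlen ⊢; omega) hx'.2 hy
        simp [pvS, List.map_cons, List.sum_cons, hc0, this]
      · by_cases h2 : y < x
        · simp only [if_neg h1, if_pos h2]
          have hne : ∀ a ∈ x :: xs, (a == y) = false := by
            intro a ha
            rcases List.mem_cons.mp ha with h | h
            · subst h; simpa using ne_of_gt h2
            · have : y < a := lt_of_lt_of_le h2 (hx'.1 a h)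
              simpa using ne_of_gt this
          have heq : pvS (x :: xs) (y :: ys) = pvS (x :: xs) ys := by
            unfold pvS
            congr 1
            refine List.map_congr_left (fun a ha => ?_)
            have hay : a ≠ y := by simpa using hne a ha
            simp [Ne.symm hay]
          rw [heq]
          exact ih (x :: xs) ys (by simp at hlen ⊢; omega) hx hy'.2
        · have hxy : x = y := le_antisymm (not_lt.mp h2) (not_lt.mp h1)
          subst hxy
          simp only [if_neg h1]
          set xr := (x :: xs).takeWhile (· == x) with hxr_def
          set xd := (x :: xs).dropWhile (· == x) with hxd_def
          set yr := (x :: ys).takeWhile (· == x) with hyr_def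
          set yd := (x :: ys).dropWhile (· == x) with hyd_def
          have hxapp : xr ++ xd = x :: xs := List.takeWhile_append_dropWhile
          have hyapp : yr ++ yd = x :: ys := List.takeWhile_append_dropWhile
          have hxr_all : ∀ a ∈ xr, a = x := by
            intro a ha; simpa using List.mem_takeWhile_imp ha
          have hyr_all : ∀ a ∈ yr, a = x := by
            intro a ha; simpa using List.mem_takeWhile_imp ha
          have hxd_gt : ∀ a ∈ xd, x < a := by
            intro a ha
            cases hcase : xd with
            | nil => rw [hcase] at ha; simp at ha
            | cons b t =>
              have hb_ne : (b == x) = false :=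
                pv_dropWhile_head_false (· == x) (x :: xs) b t (by rw [← hxd_def, hcase])
              have hb_mem : b ∈ x :: xs := by
                rw [← hxapp, hcase]; exact List.mem_append_right _ (List.mem_cons_self ..)
              have hb_le : x ≤ b := by
                rcases List.mem_cons.mp hb_mem with h | h
                · exact le_of_eq h.symm
                · exact hx'.1 b h
              have hb_gt : x < b := lt_of_le_of_ne hb_le (Ne.symm (by simpa using hb_ne))
              rw [hcase] at ha
              rcases List.mem_cons.mp ha with h | h
              · exact h ▸ hb_gt
              · have hpd : xd.Pairwise (· ≤ ·) :=
                  List.Pairwise.sublist (List.dropWhile_sublist _) hx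
                rw [hcase] at hpd
                exact lt_of_lt_of_le hb_gt ((List.pairwise_cons.mp hpd).1 a h)
          have hyd_gt : ∀ a ∈ yd, x < a := by
            intro a ha
            cases hcase : yd with
            | nil => rw [hcase] at ha; simp at ha
            | cons b t =>
              have hb_ne : (b == x) = false :=
                pv_dropWhile_head_false (· == x) (x :: ys) b t (by rw [← hyd_def, hcase])
              have hb_mem : b ∈ x :: ys := by
                rw [← hyapp, hcase]; exact List.mem_append_right _ (List.mem_cons_self ..)
              have hb_le : x ≤ b := by
                rcases List.mem_cons.mp hb_mem with h | h
                · exact le_of_eq h.symm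
                · exact hy'.1 b h
              have hb_gt : x < b := lt_of_le_of_ne hb_le (Ne.symm (by simpa using hb_ne))
              rw [hcase] at ha
              rcases List.mem_cons.mp ha with h | h
              · exact h ▸ hb_gt
              · have hpd : yd.Pairwise (· ≤ ·) :=
                  List.Pairwise.sublist (List.dropWhile_sublist _) hy
                rw [hcase] at hpd
                exact lt_of_lt_of_le hb_gt ((List.pairwise_cons.mp hpd).1 a h)
          -- count x over the whole (x :: ys) is the y-run length
          have hcx : ((x :: ys).count x : Int) = (yr.length : Int) := by
            have h1 : yr.count x = yr.length :=
              List.count_eq_length.mpr (fun b hb => by simp [hyr_all b hb])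
            have h2 : yd.count x = 0 :=
              List.count_eq_zero.mpr (fun hmem => absurd (hyd_gt x hmem) (lt_irrefl x))
            rw [← hyapp, List.count_append, h1, h2]; simp
          -- elements after the x-run do not occur in the y-run
          have hcd : ∀ a ∈ xd, ((x :: ys).count a : Int) = (yd.count a : Int) := by
            intro a ha
            have h0 : yr.count a = 0 :=
              List.count_eq_zero.mpr (fun hmem => by
                have := hyr_all a hmem; exact absurd (hxd_gt a ha) (by simp [this]))
            rw [← hyapp, List.count_append, h0]; simp
          -- split the sum over the x-run and the remainder
          have hsplit : pvS (x :: xs) (x :: ys)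
              = (xr.length : Int) * (yr.length : Int) + pvS xd yd := by
            rw [show pvS (x :: xs) (x :: ys) = pvS (xr ++ xd) (x :: ys) by rw [hxapp]]
            unfold pvS
            rw [List.map_append, List.sum_append]
            congr 1
            · rw [List.map_congr_left (fun a ha => by rw [hxr_all a ha, hcx])]
              exact pv_sum_map_const xr _
            · exact congrArg List.sum (List.map_congr_left hcd)
          rw [hsplit]
          have hxr_ne : xr.length + xd.length = xs.length + 1 := by
            have := congrArg List.length hxapp; simpa using this
          have hxr_pos : 0 < xr.length := by
            have : x ∈ xr := by
              have : (x :: xs).takeWhile (· == x) = x :: xs.takeWhile (· == x) := by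
                simp
              rw [hxr_def, this]; exact List.mem_cons_self ..
            exact List.length_pos_of_mem this
          have hyr_ne : yr.length + yd.length = ys.length + 1 := by
            have := congrArg List.length hyapp; simpa using this
          have hyr_pos : 0 < yr.length := by
            have : x ∈ yr := by
              have : (x :: ys).takeWhile (· == x) = x :: ys.takeWhile (· == x) := by
                simp
              rw [hyr_def, this]; exact List.mem_cons_self ..
            exact List.length_pos_of_mem this
          have hih := ih xd yd (by simp at hlen; omega)
            (List.Pairwise.sublist (List.dropWhile_sublist _) hx)
            (List.Pairwise.sublist (List.dropWhile_sublist _) hy)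
          rw [hih]

theorem pvRunProd_eq_S (xs ys : List Char)
    (hx : xs.Pairwise (· ≤ ·)) (hy : ys.Pairwise (· ≤ ·)) :
    pvRunProd xs ys = pvS xs ys :=
  pvRunProd_eq_S_aux (xs.length + ys.length) xs ys le_rfl hx hy

theorem pvS_sorted (ls ss : List Char) :
    pvS (PySem.List.sorted ls (fun c => c) false) (PySem.List.sorted ss (fun c => c) false)
      = pvS ls ss := by
  have hperm : (PySem.List.sorted ls (fun c => c) false).Perm ls := PySem.List.sorted_perm ..
  have hperm' : (PySem.List.sorted ss (fun c => c) false).Perm ss := PySem.List.sorted_perm ..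
  unfold pvS
  have hcnt : ∀ a : Char,
      ((PySem.List.sorted ss (fun c => c) false).count a : Int) = (ss.count a : Int) := by
    intro a; exact congrArg Int.ofNat (hperm'.count_eq a)
  calc ((PySem.List.sorted ls (fun c => c) false).map
          (fun a => ((PySem.List.sorted ss (fun c => c) false).count a : Int))).sum
      = ((PySem.List.sorted ls (fun c => c) false).map (fun a => (ss.count a : Int))).sum := by
        congr 1; exact List.map_congr_left (fun a _ => hcnt a)
    _ = (ls.map (fun a => (ss.count a : Int))).sum := (hperm.map _).sum_eq

-- ===== VERDICT (by name: the statement is the Claim_ definition above) =====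
theorem checkStrings_spec : Claim_equal_checkStrings := by
  intro a b _
  unfold Spec_checkStrings checkStrings checkStrings_alt
  by_cases hab : a == b
  · simp [hab]
  · simp only [hab, Bool.false_eq_true, if_false]
    by_cases hl : a.toList.length > b.toList.length <;>
      simp only [hl, if_true, if_false] <;>
      · rw [pvA_count, pv_foldl_eq_S, ← pvS_sorted,
          ← pvRunProd_eq_S _ _ (PySem.List.sorted_pairwise ..) (PySem.List.sorted_pairwise ..)]
        exact pv_ite_decide _
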